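-- pv_equiv track=rewrite | github.com/IFT3275-Securite-Informatique/devoir-1-cryptographie-riste_richard | student_code.py | cryptToPattern
-- ===== SOURCE A (Python) =====
-- def cryptToPattern(cryptogram):
--     i = 0
--     symbol  = ""
--     symbolTab = []
--     pattern = ""
--     while i < len(cryptogram):
--         symbol += cryptogram[i]
--         if len(symbol) == 8:
--             if symbol not in symbolTab:
--                 pattern += (str(len(symbolTab))) + ","
--                 symbolTab.append(symbol)
--                 symbol = ""
--             else:
--                 pattern += str(symbolTab.index(symbol)) + ","
--                 symbol = ""
--         i += 1
--     return pattern
-- ===== SOURCE B (Python) =====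
-- def cryptToPattern(cryptogram):
--     n = (len(cryptogram) // 8) * 8
--     blocks = [cryptogram[i:i+8] for i in range(0, n, 8)]
--     index = {b: i for i, b in enumerate(dict.fromkeys(blocks))}
--     return ''.join(str(index[b]) + ',' for b in blocks)
-- ===== Notes on version B (the rewrite author's own statement) =====
-- stated objective: faster
-- what changed: Replaces A's single char-by-char loop, which keeps a symbol accumulator and rescans symbolTab (membership test and list.index) for every block, by three separate passes: slice into 8-char blocks, build a first-occurrence index dict via dict.fromkeys plus enumerate, then map each block through the dict and join.
import Mathlib
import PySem

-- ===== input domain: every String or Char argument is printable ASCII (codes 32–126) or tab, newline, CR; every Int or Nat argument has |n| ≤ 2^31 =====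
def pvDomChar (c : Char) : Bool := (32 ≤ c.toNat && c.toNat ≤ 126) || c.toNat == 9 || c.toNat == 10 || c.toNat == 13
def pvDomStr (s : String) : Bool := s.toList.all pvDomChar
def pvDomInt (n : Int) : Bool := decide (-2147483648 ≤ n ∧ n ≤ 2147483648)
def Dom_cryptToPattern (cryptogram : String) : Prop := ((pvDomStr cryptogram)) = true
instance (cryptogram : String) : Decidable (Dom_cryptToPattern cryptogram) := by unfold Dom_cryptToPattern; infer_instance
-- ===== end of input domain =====

-- B replaces A's single char-by-char loop (with per-block 'in'/'.index' scans of symbolTab) by three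
-- passes: slice into 8-char blocks, build a first-occurrence index dict, map blocks through it and join.

-- ===== PORT A =====
-- A's while loop, step for step: state (symbol, symbolTab, pattern), consuming one character per step.
-- '.index' is ported as (index? …).getD 0: in that branch symbol ∈ symbolTab, so ValueError is impossible.
def cryptA_loop : List Char → List Char → List (List Char) → String → String
  | [], _, _, pattern => pattern
  | c :: rest, symbol, symbolTab, pattern =>
    let symbol' := symbol ++ [c]
    if symbol'.length = 8 then
      if symbol' ∉ symbolTab then
        cryptA_loop rest [] (symbolTab ++ [symbol'])
          (pattern ++ PySem.Int.toStr (symbolTab.length : Int) ++ ",")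
      else
        cryptA_loop rest [] symbolTab
          (pattern ++ PySem.Int.toStr (((PySem.List.index? symbolTab symbol').getD 0 : Nat) : Int) ++ ",")
    else
      cryptA_loop rest symbol' symbolTab pattern

def cryptToPattern (cryptogram : String) : String :=
  cryptA_loop cryptogram.toList [] [] ""

-- ===== PORT B =====
-- Source B, step for step: blocks by slicing, the dict comprehension as a fold of insert over
-- enumerate(dict.fromkeys(blocks)) (= PySem.List.dedup), then the joined generator expression.
-- index[b]: every b ∈ blocks is a key of index, so KeyError is impossible; ported as getD.
def cryptToPattern_alt (cryptogram : String) : String :=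
  let cs := cryptogram.toList
  let n : Nat := (cs.length / 8) * 8
  let blocks : List (List Char) :=
    (PySem.List.pyRange 0 (n : Int) 8).map (fun i => PySem.List.slice cs (some i) (some (i + 8)))
  let index : PySem.Dict (List Char) Int :=
    (PySem.List.enumerate (PySem.List.dedup blocks) 0).foldl
      (fun d p => d.insert p.2 p.1) PySem.Dict.empty
  PySem.Str.join "" (blocks.map (fun b => PySem.Int.toStr (index.getD b 0) ++ ","))

-- ===== PRECONDITION & SPEC =====
def Spec_cryptToPattern (cryptogram : String) (out : String) : Prop := out = cryptToPattern_alt cryptogram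
instance (cryptogram : String) (out : String) : Decidable (Spec_cryptToPattern cryptogram out) := by unfold Spec_cryptToPattern; infer_instance

-- ===== CLAIM (what is proved, stated in full; the proofs are below) =====
def Claim_equal_cryptToPattern : Prop := ∀ (cryptogram : String), Dom_cryptToPattern cryptogram → Spec_cryptToPattern cryptogram (cryptToPattern cryptogram)

-- ===== LEMMAS AND PROOFS =====

-- blocks of 8 consecutive characters, the trailing partial block dropped
def pvBlocks8 (cs : List Char) : List (List Char) :=
  if _h : 8 ≤ cs.length then cs.take 8 :: pvBlocks8 (cs.drop 8) else []
termination_by cs.length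
decreasing_by all_goals (simp only [List.length_drop]; omega)

-- the sequence of indices A emits, with the evolving symbolTab
def pvIdxList : List (List Char) → List (List Char) → List Int
  | [], _ => []
  | b :: bs, tab =>
    if b ∉ tab then (tab.length : Int) :: pvIdxList bs (tab ++ [b])
    else (((PySem.List.index? tab b).getD 0 : Nat) : Int) :: pvIdxList bs tab

-- rendering of an index list as characters
def pvRender : List Int → List Char
  | [] => []
  | k :: ks => PySem.Int.toChars k ++ ',' :: pvRender ks

def pvExt : List (List Char) → List (List Char) → List (List Char)
  | tab, [] => tab
  | tab, b :: bs => pvExt (PySem.Set.add tab b) bs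

theorem pv_loop_tail (cs symbol : List Char) (tab : List (List Char)) (pat : String)
    (h : symbol.length + cs.length < 8) : cryptA_loop cs symbol tab pat = pat := by
  induction cs generalizing symbol with
  | nil => rfl
  | cons c rest ih =>
    simp only [cryptA_loop]
    have hne : (symbol ++ [c]).length ≠ 8 := by simp; simp at h; omega
    rw [if_neg hne]
    apply ih
    simp at h ⊢; omega

theorem pv_loop_block (b : List Char) (rest : List Char) (symbol : List Char)
    (tab : List (List Char)) (pat : String)
    (hlen : symbol.length + b.length = 8) (hb : b ≠ []) :
    cryptA_loop (b ++ rest) symbol tab pat =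
      if symbol ++ b ∉ tab then
        cryptA_loop rest [] (tab ++ [symbol ++ b])
          (pat ++ PySem.Int.toStr (tab.length : Int) ++ ",")
      else
        cryptA_loop rest [] tab
          (pat ++ PySem.Int.toStr (((PySem.List.index? tab (symbol ++ b)).getD 0 : Nat) : Int) ++ ",") := by
  induction b generalizing symbol with
  | nil => exact absurd rfl hb
  | cons c b' ih =>
    simp only [List.cons_append, cryptA_loop]
    cases b' with
    | nil =>
      have h8 : (symbol ++ [c]).length = 8 := by simp at hlen ⊢; omega
      rw [if_pos h8]
      simp
    | cons d b'' =>
      have hne : (symbol ++ [c]).length ≠ 8 := by simp at hlen ⊢; omega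
      rw [if_neg hne]
      have := ih (symbol := symbol ++ [c]) (by simp at hlen ⊢; omega) (by simp)
      simpa using this

theorem pvA_render (cs : List Char) (tab : List (List Char)) (pat : String) :
    (cryptA_loop cs [] tab pat).toList = pat.toList ++ pvRender (pvIdxList (pvBlocks8 cs) tab) := by
  by_cases h : 8 ≤ cs.length
  · have hcs : cs = cs.take 8 ++ cs.drop 8 := (List.take_append_drop 8 cs).symm
    have hlen : (cs.take 8).length = 8 := by simp; omega
    have hb : cs.take 8 ≠ [] := by
      intro hnil; rw [hnil] at hlen; simp at hlen
    rw [pvBlocks8, dif_pos h]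
    conv_lhs => rw [hcs]
    rw [pv_loop_block (cs.take 8) (cs.drop 8) [] tab pat (by simpa using hlen) hb]
    simp only [List.nil_append, pvIdxList]
    by_cases hmem : cs.take 8 ∈ tab
    · rw [if_neg (by simpa using hmem), if_neg (by simpa using hmem)]
      rw [pvA_render (cs.drop 8) tab _]
      simp [pvRender, PySem.Int.toList_toStr]
    · rw [if_pos hmem, if_pos hmem]
      rw [pvA_render (cs.drop 8) (tab ++ [cs.take 8]) _]
      simp [pvRender, PySem.Int.toList_toStr]
  · rw [pvBlocks8, dif_neg h]
    rw [pv_loop_tail cs [] tab pat (by simp; omega)]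
    simp [pvIdxList, pvRender]
termination_by cs.length
decreasing_by all_goals (simp only [List.length_drop]; omega)

theorem pvAdd_of_mem (tab : List (List Char)) (b : List Char) (h : b ∈ tab) :
    PySem.Set.add tab b = tab := by
  simp only [PySem.Set.add]
  rw [if_pos]; simp [h]

theorem pvAdd_of_not_mem (tab : List (List Char)) (b : List Char) (h : b ∉ tab) :
    PySem.Set.add tab b = tab ++ [b] := by
  simp only [PySem.Set.add]
  rw [if_neg]; simp [h]

theorem pvExt_prefix (bs tab : List (List Char)) : ∃ t, pvExt tab bs = tab ++ t := by
  induction bs generalizing tab with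
  | nil => exact ⟨[], by simp [pvExt]⟩
  | cons b bs ih =>
    simp only [pvExt]
    by_cases hb : b ∈ tab
    · rw [pvAdd_of_mem tab b hb]; exact ih tab
    · rw [pvAdd_of_not_mem tab b hb]
      obtain ⟨t, ht⟩ := ih (tab ++ [b])
      exact ⟨[b] ++ t, by rw [ht]; simp⟩

theorem pvIdx_eq (bs tab : List (List Char)) (htab : tab.Nodup) :
    pvIdxList bs tab =
      bs.map (fun b => (((PySem.List.index? (pvExt tab bs) b).getD 0 : Nat) : Int)) := by
  induction bs generalizing tab with
  | nil => simp [pvIdxList]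
  | cons b bs ih =>
    simp only [pvIdxList, List.map_cons]
    by_cases hmem : b ∈ tab
    · rw [if_neg (by simpa using hmem)]
      have hext : pvExt tab (b :: bs) = pvExt tab bs := by
        rw [pvExt, pvAdd_of_mem tab b hmem]
      rw [hext, ih tab htab]
      congr 1
      obtain ⟨t, ht⟩ := pvExt_prefix bs tab
      rw [ht, PySem.List.index?_append_of_mem t hmem]
    · rw [if_pos hmem]
      have hext : pvExt tab (b :: bs) = pvExt (tab ++ [b]) bs := by
        rw [pvExt, pvAdd_of_not_mem tab b hmem]
      have hnodup : (tab ++ [b]).Nodup := by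
        rw [List.nodup_append]
        refine ⟨htab, List.nodup_singleton b, ?_⟩
        intro a ha b2 hb2
        have hab : b2 = b := by simpa using hb2
        subst hab
        intro heq
        exact hmem (heq ▸ ha)
      rw [hext, ih (tab ++ [b]) hnodup]
      congr 1
      obtain ⟨t, ht⟩ := pvExt_prefix bs (tab ++ [b])
      rw [ht, PySem.List.index?_append_of_mem t (show b ∈ tab ++ [b] by simp),
        PySem.List.index?_append_singleton_self tab b hmem]
      simp

theorem pvExt_eq_foldl (tab bs : List (List Char)) :
    pvExt tab bs = bs.foldl PySem.Set.add tab := by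
  induction bs generalizing tab with
  | nil => rfl
  | cons b bs ih => rw [pvExt, ih, List.foldl_cons]

theorem pvDedup_eq_ext (bs : List (List Char)) : PySem.List.dedup bs = pvExt [] bs := by
  rw [pvExt_eq_foldl, PySem.List.dedup_eq_ofList]
  rfl

theorem pvDict_getD (U : List (List Char)) (hU : U.Nodup) (b : List Char) (hb : b ∈ U) :
    ((PySem.List.enumerate U 0).foldl (fun d p => d.insert p.2 p.1)
        (PySem.Dict.empty : PySem.Dict (List Char) Int)).getD b 0
      = (((PySem.List.index? U b).getD 0 : Nat) : Int) := by
  have hnodupsnd : ((PySem.List.enumerate U 0).map (·.2)).Nodup := by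
    rw [PySem.List.map_snd_enumerate]; exact hU
  have hitems := PySem.Dict.items_foldl_insert_fresh (PySem.List.enumerate U 0)
    (fun p => p.2) (fun p => p.1) PySem.Dict.empty
    (fun a _ => by simp [PySem.Dict.contains_empty]) hnodupsnd
  set d := (PySem.List.enumerate U 0).foldl (fun d p => d.insert p.2 p.1)
    (PySem.Dict.empty : PySem.Dict (List Char) Int) with hd
  have hitems' : d.items = (PySem.List.enumerate U 0).map (fun p => (p.2, p.1)) := by
    simpa using hitems
  have hkeys : d.keys.Nodup := by
    show (d.items.map (·.1)).Nodup
    rw [hitems', List.map_map]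
    exact hnodupsnd
  obtain ⟨j, hj⟩ : ∃ j, PySem.List.index? U b = some j := by
    have := (PySem.List.index?_isSome_iff (xs := U) (v := b)).mpr hb
    exact Option.isSome_iff_exists.mp this
  obtain ⟨pre, suf, hsplit, hplen, _⟩ := (PySem.List.index?_eq_some_iff U b j).mp hj
  have hmemitems : (b, (j : Int)) ∈ d.items := by
    rw [hitems', hsplit, PySem.List.enumerate_append]
    simp only [List.map_append, List.mem_append]
    right
    rw [PySem.List.enumerate_cons]
    simp [hplen]
  rw [PySem.Dict.getD_of_mem_items d hmemitems hkeys, hj]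
  simp

theorem pvJoin_nil_flatten (ps : List (List Char)) :
    PySem.Chars.join [] ps = ps.flatten := by
  induction ps with
  | nil => simp [PySem.Chars.join_nil]
  | cons p ps ih =>
    cases ps with
    | nil => simp [PySem.Chars.join_singleton]
    | cons q rest =>
      rw [PySem.Chars.join_cons_cons]
      simp only [List.flatten_cons]
      rw [ih]
      simp

theorem pvFlatten_render (ks : List Int) :
    (ks.map (fun k => PySem.Int.toChars k ++ [','])).flatten = pvRender ks := by
  induction ks with
  | nil => simp [pvRender]
  | cons k ks ih => simp [pvRender, ih]

theorem pvRange8 (q : Nat) :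
    PySem.List.pyRange 0 ((q * 8 : Nat) : Int) 8 =
      (List.range q).map (fun k => ((k * 8 : Nat) : Int)) := by
  rw [PySem.List.pyRange_of_pos 0 _ (by norm_num)]
  rcases Nat.eq_zero_or_pos q with hq | hq
  · subst hq; simp
  · rw [if_pos (by push_cast; omega)]
    have : ((((q * 8 : Nat) : Int) - 0 + 8 - 1) / 8).toNat = q := by omega
    rw [this]
    apply List.map_congr_left
    intro k _
    push_cast
    ring

theorem pvBlocks8_eq (cs : List Char) :
    (List.range (cs.length / 8)).map (fun k => (cs.drop (k * 8)).take 8) = pvBlocks8 cs := by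
  by_cases h : 8 ≤ cs.length
  · rw [pvBlocks8, dif_pos h]
    have hq : cs.length / 8 = (cs.drop 8).length / 8 + 1 := by simp; omega
    rw [hq, List.range_succ_eq_map, List.map_cons, List.map_map,
      ← pvBlocks8_eq (cs.drop 8)]
    congr 1
    apply List.map_congr_left
    intro k hk
    show List.take 8 (List.drop ((k+1) * 8) cs) = List.take 8 (List.drop (k*8) (List.drop 8 cs))
    rw [List.drop_drop]
    congr 2
    omega
  · rw [pvBlocks8, dif_neg h]
    have : cs.length / 8 = 0 := by omega
    simp [this]
termination_by cs.length
decreasing_by all_goals (simp only [List.length_drop]; omega)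

theorem pvB_chars (s : String) :
    (cryptToPattern_alt s).toList =
      pvRender ((pvBlocks8 s.toList).map
        (fun b => (((PySem.List.index? (PySem.List.dedup (pvBlocks8 s.toList)) b).getD 0 : Nat) : Int))) := by
  simp only [cryptToPattern_alt]
  have hblocks :
      (PySem.List.pyRange 0 (((s.toList.length / 8) * 8 : Nat) : Int) 8).map
          (fun i => PySem.List.slice s.toList (some i) (some (i + 8)))
        = pvBlocks8 s.toList := by
    rw [pvRange8, List.map_map, ← pvBlocks8_eq s.toList]
    apply List.map_congr_left
    intro k _
    show PySem.List.slice s.toList (some ((k * 8 : Nat) : Int)) (some (((k * 8 : Nat) : Int) + 8))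
        = (s.toList.drop (k * 8)).take 8
    have h8 : ((k * 8 : Nat) : Int) + 8 = ((k * 8 : Nat) : Int) + ((8 : Nat) : Int) := by push_cast; ring
    rw [h8, PySem.List.slice_natCast_add]
  rw [hblocks]
  set blocks := pvBlocks8 s.toList with hbdef
  set U := PySem.List.dedup blocks with hU
  rw [PySem.Str.toList_join]
  have hmapeq :
      blocks.map (fun b => PySem.Int.toStr
          (((PySem.List.enumerate U 0).foldl (fun d p => d.insert p.2 p.1)
            (PySem.Dict.empty : PySem.Dict (List Char) Int)).getD b 0) ++ ",")
        = blocks.map (fun b => PySem.Int.toStr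
          (((PySem.List.index? U b).getD 0 : Nat) : Int) ++ ",") := by
    apply List.map_congr_left
    intro b hb
    rw [pvDict_getD U (PySem.List.nodup_dedup blocks) b
      ((PySem.List.mem_dedup blocks b).mpr hb)]
  rw [hmapeq]
  show PySem.Chars.join "".toList
      ((blocks.map (fun b => PySem.Int.toStr (((PySem.List.index? U b).getD 0 : Nat) : Int) ++ ",")).map
        String.toList)
    = pvRender (blocks.map (fun b => (((PySem.List.index? U b).getD 0 : Nat) : Int)))
  have hsep : "".toList = ([] : List Char) := rfl
  rw [hsep, pvJoin_nil_flatten, List.map_map]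
  have : ((fun p : String => p.toList) ∘
        fun b => PySem.Int.toStr (((PySem.List.index? U b).getD 0 : Nat) : Int) ++ ",")
      = fun b => PySem.Int.toChars (((PySem.List.index? U b).getD 0 : Nat) : Int) ++ [','] := by
    funext b
    simp [PySem.Int.toList_toStr]
  rw [this, ← pvFlatten_render, List.map_map]
  rfl

-- ===== VERDICT (by name: the statement is the Claim_ definition above) =====
theorem cryptToPattern_spec : Claim_equal_cryptToPattern := by
  unfold Claim_equal_cryptToPattern Spec_cryptToPattern
  intro s _
  apply String.toList_inj.mp
  rw [pvB_chars s]
  show (cryptA_loop s.toList [] [] "").toList = _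
  rw [pvA_render s.toList [] ""]
  rw [pvIdx_eq (pvBlocks8 s.toList) [] List.nodup_nil, ← pvDedup_eq_ext]
  rfl
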